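-- pv_equiv track=rewrite | github.com/PoliUniLu/cora | cora/petric.py | _is_irredundant_sum
-- ===== SOURCE A (Python) =====
-- def _is_irredundant_sum(partial_solution_with_coverage, coverage):
-- 	coverage_counts = {k:0 for k in coverage}
-- 	for imp, imp_coverage in partial_solution_with_coverage:
-- 		for x in imp_coverage:
-- 			coverage_counts[x] += 1
-- 	for _, imp_coverage in partial_solution_with_coverage:
-- 		if all(coverage_counts[x] > 1 for x in imp_coverage):
-- 			return False
-- 	return True
-- ===== SOURCE B (Python) =====
-- def _is_irredundant_sum(partial_solution_with_coverage, coverage):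
--     # Ownership index: for each coverage element, which implicant (by position)
--     # is its unique coverer.  None = not covered yet, -1 = covered more than once.
--     owner = {k: None for k in coverage}
--     for idx, (_, imp_coverage) in enumerate(partial_solution_with_coverage):
--         for x in imp_coverage:
--             owner[x] = idx if owner[x] is None else -1
--     needed = {v for v in owner.values() if v is not None and v != -1}
--     return len(needed) == len(partial_solution_with_coverage)
-- ===== Notes on version B (the rewrite author's own statement) =====
-- stated objective: alternative
-- what changed: Replaces A's count-every-element pass followed by a rescan of every implicant's coverage with a single element-to-owner index pass (unique owner / shared sentinel) and a final set-cardinality comparison against the number of implicants.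
import Mathlib
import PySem

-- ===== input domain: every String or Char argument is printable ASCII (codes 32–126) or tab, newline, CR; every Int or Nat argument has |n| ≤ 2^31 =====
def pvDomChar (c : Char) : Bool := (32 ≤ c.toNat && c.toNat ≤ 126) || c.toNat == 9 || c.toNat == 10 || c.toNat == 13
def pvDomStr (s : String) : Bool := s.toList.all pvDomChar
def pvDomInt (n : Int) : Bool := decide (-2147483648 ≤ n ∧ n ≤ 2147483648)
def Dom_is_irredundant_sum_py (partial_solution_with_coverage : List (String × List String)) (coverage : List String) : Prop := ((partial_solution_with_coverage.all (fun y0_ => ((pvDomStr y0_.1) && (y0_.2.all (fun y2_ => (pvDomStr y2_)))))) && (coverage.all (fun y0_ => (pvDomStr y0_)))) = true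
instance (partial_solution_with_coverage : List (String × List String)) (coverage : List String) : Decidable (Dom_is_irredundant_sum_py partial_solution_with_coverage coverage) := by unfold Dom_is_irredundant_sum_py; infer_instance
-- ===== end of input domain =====

-- B replaces A's count-all-elements pass plus rescan of every implicant with a single
-- element-to-owner index pass and a final set-cardinality comparison (objective: alternative).

-- ===== PORT A =====
-- Literal port of _is_irredundant_sum.  coverage_counts[x] += 1 and coverage_counts[x]
-- raise KeyError when x ∉ coverage; Pre_ excludes those inputs, so the defaulted
-- Dict.modify/getD used here are exact on every admitted input.
def is_irredundant_sum_py (partial_solution_with_coverage : List (String × List String)) (coverage : List String) : Bool :=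
  let coverage_counts : PySem.Dict String Int :=
    coverage.foldl (fun d k => d.insert k 0) PySem.Dict.empty
  let coverage_counts :=
    partial_solution_with_coverage.foldl
      (fun d p => p.2.foldl (fun d x => d.modify x 0 (· + 1)) d) coverage_counts
  !(partial_solution_with_coverage.any
      (fun p => p.2.all (fun x => coverage_counts.getD x 0 > 1)))

-- ===== PORT B =====
-- Literal port of Source B.  owner[x] raises KeyError when x ∉ coverage; Pre_ excludes those
-- inputs, so the defaulted Dict.getD used for the lookup is exact on every admitted input
-- (the sentinel None of Source B is `none`, the shared marker -1 is `some (-1)`).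
def is_irredundant_sum_py_alt (partial_solution_with_coverage : List (String × List String)) (coverage : List String) : Bool :=
  let owner : PySem.Dict String (Option Int) :=
    coverage.foldl (fun d k => d.insert k none) PySem.Dict.empty
  let owner :=
    (PySem.List.enumerate partial_solution_with_coverage 0).foldl
      (fun d ip => ip.2.2.foldl
        (fun d x => d.insert x (if d.getD x none = none then some ip.1 else some (-1))) d)
      owner
  let needed : PySem.Set Int :=
    PySem.Set.ofList (owner.values.filterMap
      (fun v => match v with | none => none | some i => if i = -1 then none else some i))
  needed.length == partial_solution_with_coverage.length

-- ===== PRECONDITION & SPEC =====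
-- Pre_ excludes exactly the inputs where some covered element is missing from `coverage`:
-- there Python A raises KeyError (and so does Python B).
def Pre_is_irredundant_sum_py (partial_solution_with_coverage : List (String × List String)) (coverage : List String) : Prop :=
  ∀ p ∈ partial_solution_with_coverage, ∀ x ∈ p.2, x ∈ coverage
instance (partial_solution_with_coverage : List (String × List String)) (coverage : List String) : Decidable (Pre_is_irredundant_sum_py partial_solution_with_coverage coverage) := by unfold Pre_is_irredundant_sum_py; infer_instance

def pvWitness_is_irredundant_sum_py : (List (String × List String)) × List String :=
  ([("p", ["a", "b"]), ("q", ["b", "c"])], ["a", "b", "c"])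

def Spec_is_irredundant_sum_py (partial_solution_with_coverage : List (String × List String)) (coverage : List String) (out : Bool) : Prop := out = is_irredundant_sum_py_alt partial_solution_with_coverage coverage
instance (partial_solution_with_coverage : List (String × List String)) (coverage : List String) (out : Bool) : Decidable (Spec_is_irredundant_sum_py partial_solution_with_coverage coverage out) := by unfold Spec_is_irredundant_sum_py; infer_instance

-- ===== CLAIM (what is proved, stated in full; the proofs are below) =====
def Claim_equal_is_irredundant_sum_py : Prop := ∀ (partial_solution_with_coverage : List (String × List String)) (coverage : List String), Dom_is_irredundant_sum_py partial_solution_with_coverage coverage → Pre_is_irredundant_sum_py partial_solution_with_coverage coverage → Spec_is_irredundant_sum_py partial_solution_with_coverage coverage (is_irredundant_sum_py partial_solution_with_coverage coverage)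

-- ===== LEMMAS AND PROOFS =====

-- (idx, element) pairs of B's double loop, flattened
def pvFlatIdx (sol : List (String × List String)) : List (Int × String) :=
  (PySem.List.enumerate sol 0).flatMap (fun ip => ip.2.2.map (fun x => (ip.1, x)))

-- indices (in order) of the implicant occurrences covering x
def pvOccs (sol : List (String × List String)) (x : String) : List Int :=
  (pvFlatIdx sol).filterMap (fun p => if p.2 = x then some p.1 else none)

-- A-side: the initial dict maps everything to 0
lemma pv_getD_init0 (cov : List String) (d : PySem.Dict String Int) (x : String)
    (h : d.getD x 0 = 0) :
    (cov.foldl (fun d k => d.insert k (0:Int)) d).getD x 0 = 0 := by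
  induction cov generalizing d with
  | nil => exact h
  | cons k t ih =>
      simp only [List.foldl_cons]
      exact ih _ (by rw [PySem.Dict.getD_insert]; split <;> simp [h])

-- A-side: the counting double loop computes total multiplicities
lemma pv_counts_fold (l : List (String × List String)) (d : PySem.Dict String Int) (x : String) :
    (l.foldl (fun d p => p.2.foldl (fun d x => d.modify x 0 (· + 1)) d) d).getD x 0
      = d.getD x 0 + ((l.flatMap Prod.snd).count x : Int) := by
  induction l generalizing d with
  | nil => simp
  | cons p t ih =>
      simp only [List.foldl_cons, List.flatMap_cons, List.count_append]
      rw [ih, PySem.Dict.getD_foldl_modify_add_one]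
      push_cast; ring

-- B-side: the initial dict maps everything to none
lemma pv_getD_init_none (cov : List String) (d : PySem.Dict String (Option Int)) (x : String)
    (h : d.getD x none = none) :
    (cov.foldl (fun d k => d.insert k (none : Option Int)) d).getD x none = none := by
  induction cov generalizing d with
  | nil => exact h
  | cons k t ih =>
      simp only [List.foldl_cons]
      exact ih _ (by rw [PySem.Dict.getD_insert]; split <;> simp [h])

-- B-side: the nested loop is the single loop over the flattened (idx, element) pairs
lemma pv_nested_fold {α : Type} (l : List (Int × (String × List String)))
    (F : α → Int → String → α) (d : α) :
    l.foldl (fun d ip => ip.2.2.foldl (fun d x => F d ip.1 x) d) d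
      = (l.flatMap (fun ip => ip.2.2.map (fun x => (ip.1, x)))).foldl
          (fun d p => F d p.1 p.2) d := by
  induction l generalizing d with
  | nil => rfl
  | cons ip t ih =>
      simp only [List.foldl_cons, List.flatMap_cons, List.foldl_append, List.foldl_map]
      exact ih _

-- B-side: value of the owner dict at x, as a fold over the entries keyed x
lemma pv_owner_fold (l : List (Int × String)) (d : PySem.Dict String (Option Int)) (x : String) :
    (l.foldl (fun d p => d.insert p.2 (if d.getD p.2 none = none then some p.1 else some (-1))) d).getD x none
      = l.foldl (fun st p => if p.2 = x then (if st = none then some p.1 else some (-1)) else st)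
          (d.getD x none) := by
  induction l generalizing d with
  | nil => rfl
  | cons p t ih =>
      simp only [List.foldl_cons]
      rw [ih]
      by_cases h : p.2 = x
      · subst h; rw [PySem.Dict.getD_insert, if_pos rfl]
      · rw [PySem.Dict.getD_insert, if_neg (fun h' => h h'.symm), if_neg h]

-- a guarded fold is the fold over the filterMap selecting the guarded entries
lemma pv_foldl_if_filterMap {α : Type} (l : List (Int × String)) (x : String)
    (g : α → Int → α) (init : α) :
    l.foldl (fun st p => if p.2 = x then g st p.1 else st) init
      = (l.filterMap (fun p => if p.2 = x then some p.1 else none)).foldl g init := by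
  induction l generalizing init with
  | nil => rfl
  | cons p t ih =>
      simp only [List.foldl_cons]
      by_cases h : p.2 = x <;> simp [h, ih]

-- the ownership fold, once seeded with some value, yields -1 iff more entries follow
lemma pv_foldl_step_some (l : List Int) (c : Int) :
    l.foldl (fun st i => if st = none then some i else some (-1)) (some c)
      = if l.isEmpty then some c else some (-1) := by
  induction l generalizing c with
  | nil => rfl
  | cons a t ih => simp [ih]

-- the ownership fold from the empty state on a nonempty occurrence list
lemma pv_foldl_step_cons (a : Int) (l : List Int) :
    (a :: l).foldl (fun st i => if st = none then some i else some (-1)) none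
      = if l.isEmpty then some a else some (-1) := by
  simp [List.foldl_cons, pv_foldl_step_some]

-- membership in enumerate
lemma pv_mem_enumerate {α : Type} (l : List α) (s j : Int) (p : α) :
    (j, p) ∈ PySem.List.enumerate l s ↔ ∃ t : Nat, ∃ h : t < l.length, j = s + t ∧ p = l[t] := by
  induction l generalizing s with
  | nil => simp [PySem.List.enumerate_nil]
  | cons a t ih =>
      rw [PySem.List.enumerate_cons]
      simp only [List.mem_cons, ih, Prod.mk.injEq]
      constructor
      · rintro (⟨rfl, rfl⟩ | ⟨k, hk, rfl, rfl⟩)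
        · exact ⟨0, by simp, by simp⟩
        · exact ⟨k + 1, by simp at hk ⊢; omega, by push_cast; ring, by simp⟩
      · rintro ⟨k, hk, rfl, rfl⟩
        cases k with
        | zero => left; simp
        | succ m =>
            right
            exact ⟨m, by simp at hk ⊢; omega, by push_cast; ring, by simp⟩

-- membership in the flattened pair list
lemma pv_mem_flatIdx (sol : List (String × List String)) (j : Int) (x : String) :
    (j, x) ∈ pvFlatIdx sol
      ↔ ∃ t : Nat, ∃ h : t < sol.length, j = t ∧ x ∈ (sol[t]).2 := by
  unfold pvFlatIdx
  simp only [List.mem_flatMap, List.mem_map, Prod.mk.injEq]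
  constructor
  · rintro ⟨ip, hip, y, hy, rfl, rfl⟩
    obtain ⟨t, ht, h1, h2⟩ := (pv_mem_enumerate sol 0 ip.1 ip.2).1 (by simpa using hip)
    exact ⟨t, ht, by omega, h2 ▸ hy⟩
  · rintro ⟨t, ht, rfl, hx⟩
    exact ⟨((t : Int), sol[t]), (pv_mem_enumerate sol 0 t sol[t]).2 ⟨t, ht, by omega, rfl⟩,
      x, hx, rfl, rfl⟩

-- the multiset of elements of the flattened pair list is the concatenated coverage
lemma pv_map_snd_flatIdx (sol : List (String × List String)) :
    (pvFlatIdx sol).map Prod.snd = sol.flatMap Prod.snd := by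
  unfold pvFlatIdx
  rw [List.map_flatMap]
  conv_rhs => rw [← PySem.List.map_snd_enumerate sol 0]
  rw [List.flatMap_map]
  simp [Function.comp_def]

-- total multiplicity = number of indexed occurrences
lemma pv_count_eq_occs_length (sol : List (String × List String)) (x : String) :
    (sol.flatMap Prod.snd).count x = (pvOccs sol x).length := by
  rw [← pv_map_snd_flatIdx, List.count_eq_countP, List.countP_map]
  unfold pvOccs
  rw [List.length_filterMap_eq_countP]
  apply List.countP_congr
  intro p _
  by_cases h : p.2 = x <;> simp [h]

-- every occurrence index is a valid implicant position
lemma pv_mem_occs_bounds (sol : List (String × List String)) (x : String) (i : Int)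
    (h : i ∈ pvOccs sol x) : 0 ≤ i ∧ i < sol.length := by
  unfold pvOccs at h
  obtain ⟨p, hp, hsel⟩ := List.mem_filterMap.1 h
  by_cases hx : p.2 = x
  · rw [if_pos hx] at hsel
    injection hsel with hsel
    obtain ⟨t, ht, hj, -⟩ := (pv_mem_flatIdx sol p.1 x).1 (by rw [← hx]; simpa using hp)
    omega
  · simp [hx] at hsel

-- the owner value of x, as a pure function of its occurrence list
lemma pv_ownF_eq_singleton_iff (sol : List (String × List String)) (x : String) (i : Int) :
    ((pvOccs sol x).foldl (fun st j => if st = none then some j else some (-1)) none = some i ∧ i ≠ -1)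
      ↔ pvOccs sol x = [i] := by
  constructor
  · rintro ⟨hfold, hne⟩
    match hocc : pvOccs sol x with
    | [] => rw [hocc] at hfold; simp at hfold
    | [a] =>
        rw [hocc, pv_foldl_step_cons] at hfold
        simp at hfold
        rw [hfold]
    | a :: b :: t =>
        rw [hocc, pv_foldl_step_cons] at hfold
        simp at hfold
        exact absurd hfold.symm hne
  · intro hocc
    rw [hocc]
    refine ⟨by simp, ?_⟩
    have := pv_mem_occs_bounds sol x i (by rw [hocc]; simp)
    omega

-- a dict's values are its keys looked up, when the keys are unique
lemma pv_values_eq_keys_map {ν : Type} (d : PySem.Dict String ν) (dflt : ν)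
    (h : d.keys.Nodup) :
    d.values = d.keys.map (fun k => d.getD k dflt) := by
  show d.items.map Prod.snd = (d.items.map Prod.fst).map (fun k => d.getD k dflt)
  rw [List.map_map]
  refine (List.map_congr_left ?_).symm
  rintro ⟨k, v⟩ hkv
  exact PySem.Dict.getD_of_mem_items d hkv h dflt

-- updating a set with members it already has changes nothing
lemma pv_set_update_of_subset (s : PySem.Set String) (xs : List String)
    (h : ∀ x ∈ xs, x ∈ s) : PySem.Set.update s xs = s := by
  induction xs generalizing s with
  | nil => rfl
  | cons a t ih =>
      rw [PySem.Set.update_cons, PySem.Set.add_of_mem (h a (by simp))]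
      exact ih s (fun x hx => h x (by simp [hx]))

-- the cardinality comparison says exactly "every implicant index is needed"
lemma pv_card_iff (needed : List Int) (n : Nat) (hnd : needed.Nodup)
    (hsub : ∀ i ∈ needed, i ∈ PySem.List.pyRange 0 n 1) :
    (needed.length = n) ↔ ∀ i ∈ PySem.List.pyRange 0 n 1, i ∈ needed := by
  have hR : (PySem.List.pyRange 0 (n:Int) 1).length = n := by
    rw [PySem.List.length_pyRange_one]; omega
  constructor
  · intro hlen
    have hsp := List.subperm_of_subset hnd hsub
    have hperm := List.Subperm.perm_of_length_le hsp (by omega)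
    exact fun i hi => hperm.mem_iff.2 hi
  · intro hall
    have hperm : needed.Perm (PySem.List.pyRange 0 (n:Int) 1) :=
      (List.perm_ext_iff_of_nodup hnd (PySem.List.nodup_pyRange_one 0 (n:Int))).2
        (fun a => ⟨fun ha => hsub a ha, fun ha => hall a ha⟩)
    rw [hperm.length_eq, hR]

-- A's boolean, in terms of multiplicities
lemma pv_A_iff (sol : List (String × List String)) (cov : List String) :
    is_irredundant_sum_py sol cov = true
      ↔ ∀ p ∈ sol, ∃ x ∈ p.2, (sol.flatMap Prod.snd).count x ≤ 1 := by
  unfold is_irredundant_sum_py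
  simp only [Bool.not_eq_eq_eq_not, Bool.not_true, List.any_eq_false, List.all_eq_true]
  constructor
  · intro h p hp
    obtain ⟨x, hx, hcnt⟩ := by
      have := h p hp
      simp only [not_forall] at this
      simpa using this
    refine ⟨x, hx, ?_⟩
    rw [pv_counts_fold, pv_getD_init0 _ _ _ (PySem.Dict.getD_empty _ _)] at hcnt
    simp at hcnt
    exact_mod_cast by omega
  · intro h p hp
    obtain ⟨x, hx, hcnt⟩ := h p hp
    simp only [not_forall]
    refine ⟨x, hx, ?_⟩
    rw [pv_counts_fold, pv_getD_init0 _ _ _ (PySem.Dict.getD_empty _ _)]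
    simp
    omega

-- an occurrence index really is an entry of the flattened pair list
lemma pv_occs_mem_imp (sol : List (String × List String)) (x : String) (i : Int)
    (h : i ∈ pvOccs sol x) : (i, x) ∈ pvFlatIdx sol := by
  unfold pvOccs at h
  obtain ⟨p, hp, hsel⟩ := List.mem_filterMap.1 h
  by_cases hx : p.2 = x
  · rw [if_pos hx] at hsel
    injection hsel with hsel
    rw [← hsel, ← hx]
    exact hp
  · simp [hx] at hsel

-- A's condition, re-indexed by implicant position
lemma pv_mid_iff (sol : List (String × List String)) :
    (∀ p ∈ sol, ∃ x ∈ p.2, (sol.flatMap Prod.snd).count x ≤ 1)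
      ↔ ∀ (t : Nat) (ht : t < sol.length), ∃ x ∈ (sol[t]'ht).2, pvOccs sol x = [(t : Int)] := by
  constructor
  · intro h t ht
    obtain ⟨x, hx, hcnt⟩ := h sol[t] (List.getElem_mem ht)
    have hpos : 0 < (sol.flatMap Prod.snd).count x :=
      List.count_pos_iff.2 (List.mem_flatMap.2 ⟨sol[t], List.getElem_mem ht, hx⟩)
    have hlen : (pvOccs sol x).length = 1 := by
      rw [← pv_count_eq_occs_length]; omega
    obtain ⟨a, ha⟩ := List.length_eq_one_iff.1 hlen
    have htm : (t : Int) ∈ pvOccs sol x := by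
      unfold pvOccs
      exact List.mem_filterMap.2
        ⟨((t : Int), x), (pv_mem_flatIdx sol t x).2 ⟨t, ht, rfl, hx⟩, by simp⟩
    rw [ha] at htm
    simp at htm
    exact ⟨x, hx, by rw [ha, htm]⟩
  · intro h p hp
    obtain ⟨t, ht, rfl⟩ := List.mem_iff_getElem.1 hp
    obtain ⟨x, hx, hocc⟩ := h t ht
    refine ⟨x, hx, ?_⟩
    rw [pv_count_eq_occs_length, hocc]
    simp

-- B's boolean, re-indexed by implicant position
lemma pv_B_iff (sol : List (String × List String)) (cov : List String)
    (hpre : Pre_is_irredundant_sum_py sol cov) :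
    is_irredundant_sum_py_alt sol cov = true
      ↔ ∀ (t : Nat) (ht : t < sol.length), ∃ x ∈ (sol[t]'ht).2, pvOccs sol x = [(t : Int)] := by
  simp only [is_irredundant_sum_py_alt, beq_iff_eq]
  set owner0 : PySem.Dict String (Option Int) :=
    cov.foldl (fun d k => d.insert k none) PySem.Dict.empty with h0
  set owner :=
    (PySem.List.enumerate sol 0).foldl
      (fun d ip => ip.2.2.foldl
        (fun d x => d.insert x (if d.getD x none = none then some ip.1 else some (-1))) d)
      owner0 with hw
  set vals := owner.values.filterMap
      (fun v => match v with | none => none | some i => if i = -1 then none else some i)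
      with hv
  have howner : owner = (pvFlatIdx sol).foldl
      (fun d p => d.insert p.2 (if d.getD p.2 none = none then some p.1 else some (-1)))
      owner0 := by
    rw [hw]
    exact pv_nested_fold (PySem.List.enumerate sol 0)
      (fun d i x => d.insert x (if d.getD x none = none then some i else some (-1))) owner0
  have hkeys0 : owner0.keys = PySem.Set.ofList cov := by
    rw [h0, PySem.Dict.keys_foldl_insert]
    rw [PySem.Dict.keys_empty]
    rfl
  have hkeys : owner.keys = PySem.Set.ofList cov := by
    rw [howner, PySem.Dict.keys_foldl_insert_key, hkeys0]
    apply pv_set_update_of_subset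
    intro x hx
    obtain ⟨p, hp, rfl⟩ := List.mem_map.1 hx
    obtain ⟨t, ht, -, hmem⟩ := (pv_mem_flatIdx sol p.1 p.2).1 (by simpa using hp)
    exact (PySem.Set.mem_ofList _ _).2 (hpre sol[t] (List.getElem_mem ht) p.2 hmem)
  have hndk : owner.keys.Nodup := by
    rw [hkeys]; exact PySem.Set.nodup_ofList cov
  have hgetD : ∀ x, owner.getD x none
      = (pvOccs sol x).foldl (fun st j => if st = none then some j else some (-1)) none := by
    intro x
    rw [howner, pv_owner_fold, pv_getD_init_none cov _ x (PySem.Dict.getD_empty _ _)]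
    exact pv_foldl_if_filterMap (pvFlatIdx sol) x
      (fun st j => if st = none then some j else some (-1)) none
  have hmemneed : ∀ i : Int,
      i ∈ PySem.Set.ofList vals ↔ ∃ k ∈ cov, pvOccs sol k = [i] := by
    intro i
    rw [PySem.Set.mem_ofList]
    rw [hv, List.mem_filterMap]
    constructor
    · rintro ⟨v, hvmem, hsel⟩
      rw [pv_values_eq_keys_map owner none hndk] at hvmem
      obtain ⟨k, hk, rfl⟩ := List.mem_map.1 hvmem
      rw [hkeys, PySem.Set.mem_ofList] at hk
      refine ⟨k, hk, ?_⟩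
      rw [hgetD k] at hsel
      apply (pv_ownF_eq_singleton_iff sol k i).1
      match hm : (pvOccs sol k).foldl (fun st j => if st = none then some j else some (-1)) none with
      | none => rw [hm] at hsel; simp at hsel
      | some j =>
          rw [hm] at hsel
          by_cases hj : j = -1
          · simp [hj] at hsel
          · simp [hj] at hsel
            exact ⟨by simp [hsel], by omega⟩
    · rintro ⟨k, hk, hocc⟩
      have hne : i ≠ -1 := by
        have := pv_mem_occs_bounds sol k i (by rw [hocc]; simp)
        omega
      refine ⟨owner.getD k none, ?_, ?_⟩
      · rw [pv_values_eq_keys_map owner none hndk]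
        exact List.mem_map.2 ⟨k, by rw [hkeys]; exact (PySem.Set.mem_ofList _ _).2 hk, rfl⟩
      · rw [hgetD k, hocc]
        simp [hne]
  have hbnd : ∀ i ∈ PySem.Set.ofList vals,
      i ∈ PySem.List.pyRange 0 (sol.length : Int) 1 := by
    intro i hi
    obtain ⟨k, -, hocc⟩ := (hmemneed i).1 hi
    have := pv_mem_occs_bounds sol k i (by rw [hocc]; simp)
    exact PySem.List.mem_pyRange_one.2 (by omega)
  rw [pv_card_iff (PySem.Set.ofList vals) sol.length (PySem.Set.nodup_ofList vals) hbnd]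
  constructor
  · intro h t ht
    have hin : ((t : Int)) ∈ PySem.Set.ofList vals :=
      h _ (PySem.List.mem_pyRange_one.2 (by omega))
    obtain ⟨k, -, hocc⟩ := (hmemneed _).1 hin
    have hflat : ((t : Int), k) ∈ pvFlatIdx sol :=
      pv_occs_mem_imp sol k _ (by rw [hocc]; simp)
    obtain ⟨t', ht', heq, hmem⟩ := (pv_mem_flatIdx sol _ k).1 hflat
    have : t' = t := by omega
    subst this
    exact ⟨k, hmem, hocc⟩
  · intro h i hi
    have hb := PySem.List.mem_pyRange_one.1 hi
    obtain ⟨x, hx, hocc⟩ := h i.toNat (by omega)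
    refine (hmemneed i).2 ⟨x, hpre _ (List.getElem_mem (by omega)) x hx, ?_⟩
    rw [hocc]
    congr 1
    omega

-- ===== VERDICT (by name: the statement is the Claim_ definition above) =====
theorem is_irredundant_sum_py_spec : Claim_equal_is_irredundant_sum_py := by
  intro sol cov _hdom hpre
  unfold Spec_is_irredundant_sum_py
  have h : is_irredundant_sum_py sol cov = true ↔ is_irredundant_sum_py_alt sol cov = true :=
    (pv_A_iff sol cov).trans ((pv_mid_iff sol).trans (pv_B_iff sol cov hpre).symm)
  cases hA : is_irredundant_sum_py sol cov <;> cases hB : is_irredundant_sum_py_alt sol cov <;>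
    simp_all
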